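-- pv_equiv track=rewrite | github.com/CompEpigen/methylbert | src/methylbert/data/bam.py | handling_cigar
-- ===== SOURCE A (Python) =====
-- def parse_cigar(cigar: str):
-- 	num = 0
-- 	cigar_char = list()
-- 	cigar_num = list()
-- 	cigar = list(cigar)
--
-- 	for c in cigar:
-- 		if c.isdigit() :
-- 			num = num*10 + int(c)
-- 		else:
-- 			cigar_char.append(c)
-- 			cigar_num.append(num)
-- 			num = 0
-- 	return cigar_char, cigar_num
--
-- def handling_cigar(methyl_seq: str, cigarstring: str):
-- 	# Handle cigar strings
-- 	cigar_list, num_list = parse_cigar(cigarstring)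
-- 	start_idx  = 0
-- 	new_seq, new_methyl_seq = "", ""
--
-- 	for c, n in zip(cigar_list, num_list):
-- 		if c not in ["D", "S", "I"]:
-- 			new_methyl_seq += methyl_seq[start_idx:start_idx+n]
-- 		elif c in ["D", "N"]:
-- 			new_methyl_seq += "".join(["D" for nn in range(n)])
-- 			continue
-- 		start_idx += n
--
-- 	return new_methyl_seq
-- ===== SOURCE B (Python) =====
-- def handling_cigar(methyl_seq: str, cigarstring: str):
--     # Single fused pass over the cigar string: accumulate the run length in n,
--     # dispatch immediately on each op letter, collect pieces and join at the end.
--     parts = []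
--     start = 0
--     n = 0
--     for ch in cigarstring:
--         if ch.isdigit():
--             n = n * 10 + (ord(ch) - 48)
--         else:
--             if ch == 'D':
--                 parts.append('D' * n)
--             elif ch not in ('S', 'I'):
--                 parts.append(methyl_seq[start:start + n])
--                 start += n
--             else:
--                 start += n
--             n = 0
--     return ''.join(parts)
-- ===== Notes on version B (the rewrite author's own statement) =====
-- stated objective: simpler
-- what changed: Replaces the two-pass design (parse_cigar building two parallel lists, then a zip loop consuming them) with one fused pass over the cigar string that accumulates the run length and dispatches on each op letter directly, collecting pieces and joining once at the end.
import Mathlib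
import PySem

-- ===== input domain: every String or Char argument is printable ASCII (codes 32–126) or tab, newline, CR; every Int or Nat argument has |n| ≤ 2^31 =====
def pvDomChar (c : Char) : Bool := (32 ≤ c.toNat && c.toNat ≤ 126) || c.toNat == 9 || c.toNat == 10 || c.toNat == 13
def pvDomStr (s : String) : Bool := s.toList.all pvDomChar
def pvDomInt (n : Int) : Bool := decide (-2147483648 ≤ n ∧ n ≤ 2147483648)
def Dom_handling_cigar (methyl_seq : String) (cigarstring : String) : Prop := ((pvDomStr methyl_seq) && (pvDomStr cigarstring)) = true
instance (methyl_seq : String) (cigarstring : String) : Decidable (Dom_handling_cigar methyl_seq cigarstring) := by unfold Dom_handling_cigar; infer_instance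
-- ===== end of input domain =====

-- B fuses A's two passes (parse_cigar into parallel lists, then a zip loop) into one
-- pass over the cigar string that dispatches on each op letter directly (objective: simpler).


-- ===== PORT A =====
-- loop body of parse_cigar; int(c) on a digit char is exactly c.toNat - 48 (ASCII)
def pcStep (st : Int × List Char × List Int) (c : Char) : Int × List Char × List Int :=
  if PySem.Chars.isdigit c then (st.1 * 10 + ((c.toNat : Int) - 48), st.2.1, st.2.2)
  else (0, st.2.1 ++ [c], st.2.2 ++ [st.1])

def parse_cigar (cigar : String) : List Char × List Int :=
  let r := cigar.toList.foldl pcStep (0, [], [])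
  (r.2.1, r.2.2)

-- loop body of handling_cigar over zip(cigar_list, num_list); state (start_idx, new_methyl_seq)
def hcStep (ms : List Char) (st : Int × List Char) (cn : Char × Int) : Int × List Char :=
  if ¬ (cn.1 = 'D' ∨ cn.1 = 'S' ∨ cn.1 = 'I') then
    (st.1 + cn.2, st.2 ++ PySem.List.slice ms (some st.1) (some (st.1 + cn.2)))
  else if cn.1 = 'D' ∨ cn.1 = 'N' then
    (st.1, st.2 ++ List.replicate cn.2.toNat 'D')   -- "".join(["D" for nn in range(n)])
  else (st.1 + cn.2, st.2)

def handling_cigar (methyl_seq : String) (cigarstring : String) : String :=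
  let p := parse_cigar cigarstring
  let r := (p.1.zip p.2).foldl (hcStep methyl_seq.toList) (0, [])
  String.ofList r.2

-- ===== PORT B =====
-- loop body of B's single fused pass; state (start, n, parts)
def altStep (ms : List Char) (st : Int × Int × List (List Char)) (ch : Char) :
    Int × Int × List (List Char) :=
  if PySem.Chars.isdigit ch then (st.1, st.2.1 * 10 + ((ch.toNat : Int) - 48), st.2.2)
  else if ch = 'D' then (st.1, 0, st.2.2 ++ [List.replicate st.2.1.toNat 'D'])
  else if ¬ (ch = 'S' ∨ ch = 'I') then
    (st.1 + st.2.1, 0, st.2.2 ++ [PySem.List.slice ms (some st.1) (some (st.1 + st.2.1))])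
  else (st.1 + st.2.1, 0, st.2.2)

def handling_cigar_alt (methyl_seq : String) (cigarstring : String) : String :=
  let r := cigarstring.toList.foldl (altStep methyl_seq.toList) (0, 0, [])
  String.ofList r.2.2.flatten

-- ===== PRECONDITION & SPEC =====
def Spec_handling_cigar (methyl_seq : String) (cigarstring : String) (out : String) : Prop := out = handling_cigar_alt methyl_seq cigarstring
instance (methyl_seq : String) (cigarstring : String) (out : String) : Decidable (Spec_handling_cigar methyl_seq cigarstring out) := by unfold Spec_handling_cigar; infer_instance

-- ===== CLAIM (what is proved, stated in full; the proofs are below) =====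
def Claim_equal_handling_cigar : Prop := ∀ (methyl_seq : String) (cigarstring : String), Dom_handling_cigar methyl_seq cigarstring → Spec_handling_cigar methyl_seq cigarstring (handling_cigar methyl_seq cigarstring)

-- ===== LEMMAS AND PROOFS =====

-- parse_cigar's fold with non-empty accumulators just prepends them
lemma pfold_acc (cs : List Char) : ∀ (n : Int) (cc : List Char) (cn : List Int),
    cs.foldl pcStep (n, cc, cn) =
      ((cs.foldl pcStep (n, [], [])).1,
       cc ++ (cs.foldl pcStep (n, [], [])).2.1,
       cn ++ (cs.foldl pcStep (n, [], [])).2.2) := by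
  induction cs with
  | nil => intro n cc cn; simp
  | cons c cs ih =>
    intro n cc cn
    by_cases hd : PySem.Chars.isdigit c
    · simp only [List.foldl_cons, pcStep, hd, if_true]
      exact ih _ cc cn
    · simp only [List.foldl_cons, pcStep, hd, Bool.false_eq_true, if_false,
        List.nil_append]
      rw [ih 0 (cc ++ [c]) (cn ++ [n]), ih 0 [c] [n]]
      simp

-- the fused pass equals parse-then-zip-consume, for any intermediate state
lemma fused_eq (ms : List Char) (cs : List Char) :
    ∀ (start n : Int) (parts : List (List Char)),
    (cs.foldl (altStep ms) (start, n, parts)).2.2.flatten =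
      (((cs.foldl pcStep (n, [], [])).2.1.zip
        (cs.foldl pcStep (n, [], [])).2.2).foldl (hcStep ms) (start, parts.flatten)).2 := by
  induction cs with
  | nil => intro start n parts; simp
  | cons c cs ih =>
    intro start n parts
    by_cases hd : PySem.Chars.isdigit c
    · simp only [List.foldl_cons, altStep, pcStep, hd, if_true]
      exact ih start (n * 10 + ((c.toNat : Int) - 48)) parts
    · simp only [List.foldl_cons, altStep, pcStep, hd, Bool.false_eq_true, if_false,
        List.nil_append]
      rw [pfold_acc cs 0 [c] [n]]
      simp only [List.singleton_append, List.zip_cons_cons, List.foldl_cons, hcStep]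
      by_cases hD : c = 'D'
      · rw [if_pos hD, if_neg (not_not_intro (Or.inl hD)),
          if_pos (Or.inl hD : c = 'D' ∨ c = 'N')]
        rw [ih start 0 (parts ++ [List.replicate n.toNat 'D'])]
        simp
      · rw [if_neg hD]
        by_cases hSI : c = 'S' ∨ c = 'I'
        · rw [if_neg (not_not_intro hSI),
            if_neg (not_not_intro (Or.inr hSI)),
            if_neg (show ¬ (c = 'D' ∨ c = 'N') by
              rcases hSI with h | h <;> subst h <;> decide)]
          exact ih (start + n) 0 parts
        · rw [if_pos hSI,
            if_pos (show ¬ (c = 'D' ∨ c = 'S' ∨ c = 'I') by tauto)]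
          rw [ih (start + n) 0
            (parts ++ [PySem.List.slice ms (some start) (some (start + n))])]
          simp

-- ===== VERDICT (by name: the statement is the Claim_ definition above) =====
theorem handling_cigar_spec : Claim_equal_handling_cigar := by
  intro methyl_seq cigarstring _
  unfold Spec_handling_cigar handling_cigar handling_cigar_alt parse_cigar
  have h := fused_eq methyl_seq.toList cigarstring.toList 0 0 []
  simp only [List.flatten_nil] at h
  simp [h]
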